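-- pv_equiv track=rewrite | github.com/lilleswing/adventcode | 2023/day12.py | check_bitstring
-- ===== SOURCE A (Python) =====
-- def check_bitstring(s, vs):
--     my_count = 0
--     counts = []
--     for i, c in enumerate(s):
--         if c == '.':
--             if my_count != 0:
--                 counts.append(my_count)
--             my_count = 0
--         if c == '#':
--             my_count += 1
--     if my_count != 0:
--         counts.append(my_count)
--     return counts == vs
-- ===== SOURCE B (Python) =====
-- def check_bitstring(s, vs):
--     counts = [seg.count('#') for seg in s.split('.') if seg.count('#') > 0]
--     return counts == vs
-- ===== Notes on version B (the rewrite author's own statement) =====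
-- stated objective: idiomatic
-- what changed: Replaces the character-by-character accumulator loop with a split-on-'.' / per-segment count('#') filter-map comprehension compared to vs.
import Mathlib
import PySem

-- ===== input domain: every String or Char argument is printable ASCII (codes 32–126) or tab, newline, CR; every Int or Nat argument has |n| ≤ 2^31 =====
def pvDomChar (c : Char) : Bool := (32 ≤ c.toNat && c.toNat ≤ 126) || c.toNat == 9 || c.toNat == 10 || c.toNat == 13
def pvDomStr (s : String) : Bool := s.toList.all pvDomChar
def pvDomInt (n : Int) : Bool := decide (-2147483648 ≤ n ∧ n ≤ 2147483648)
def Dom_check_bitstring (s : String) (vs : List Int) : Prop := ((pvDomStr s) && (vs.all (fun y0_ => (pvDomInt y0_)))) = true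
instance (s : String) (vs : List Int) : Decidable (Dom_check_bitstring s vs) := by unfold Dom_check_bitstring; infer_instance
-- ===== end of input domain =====

-- B replaces the character-by-character accumulator loop with a split-on-'.' / per-segment count('#') filter-map compared to vs (idiomatic; same cost).

-- ===== PORT A =====
-- literal port of A's loop body: the two ifs of the Python, in order, on state (my_count, counts)
def pvStep (st : Int × List Int) (c : Char) : Int × List Int :=
  let st := if c = '.' then (0, if st.1 ≠ 0 then st.2 ++ [st.1] else st.2) else st
  if c = '#' then (st.1 + 1, st.2) else st

-- the trailing "if my_count != 0: counts.append(my_count)"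
def pvFinish (st : Int × List Int) : List Int :=
  if st.1 ≠ 0 then st.2 ++ [st.1] else st.2

def check_bitstring (s : String) (vs : List Int) : Bool :=
  decide (pvFinish (s.toList.foldl pvStep (0, [])) = vs)

-- ===== PORT B =====
-- [seg.count('#') for seg in s.split('.') if seg.count('#') > 0] == vs
def check_bitstring_alt (s : String) (vs : List Int) : Bool :=
  decide ((((s.toList.splitOn '.').filter
      (fun seg => decide (0 < seg.count '#'))).map
      (fun seg => (seg.count '#' : Int))) = vs)

-- ===== PRECONDITION & SPEC =====
def Spec_check_bitstring (s : String) (vs : List Int) (out : Bool) : Prop := out = check_bitstring_alt s vs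
instance (s : String) (vs : List Int) (out : Bool) : Decidable (Spec_check_bitstring s vs out) := by unfold Spec_check_bitstring; infer_instance

-- ===== CLAIM (what is proved, stated in full; the proofs are below) =====
def Claim_equal_check_bitstring : Prop := ∀ (s : String) (vs : List Int), Dom_check_bitstring s vs → Spec_check_bitstring s vs (check_bitstring s vs)

-- ===== LEMMAS AND PROOFS =====

-- the filtered counts of B, with a pending count `mc` merged into the first segment
def pvF (mc : Int) : List (List Char) → List Int
  | [] => if 0 < mc then [mc] else []
  | h :: t => (if 0 < mc + (h.count '#' : Int) then [mc + (h.count '#' : Int)] else [])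
      ++ ((t.filter (fun seg => decide (0 < seg.count '#'))).map (fun seg => (seg.count '#' : Int)))

lemma pvF_zero (segs : List (List Char)) :
    pvF 0 segs = (segs.filter (fun seg => decide (0 < seg.count '#'))).map
      (fun seg => (seg.count '#' : Int)) := by
  cases segs with
  | nil => simp [pvF]
  | cons h t =>
    simp only [pvF, List.filter_cons]
    by_cases hc : 0 < h.count '#'
    · simp [hc]
    · simp [hc]

lemma pvLoop (l : List Char) (mc : Int) (acc : List Int) (hmc : 0 ≤ mc) :
    pvFinish (l.foldl pvStep (mc, acc)) = acc ++ pvF mc (l.splitOn '.') := by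
  induction l generalizing mc acc with
  | nil =>
    simp only [List.foldl_nil, List.splitOn, List.splitOnP, List.splitOnP.go, pvF, pvFinish]
    by_cases h : mc = 0
    · simp [h]
    · have : 0 < mc := lt_of_le_of_ne hmc (Ne.symm h)
      simp [h, this]
  | cons c t ih =>
    rw [List.foldl_cons]
    by_cases hdot : c = '.'
    · have hstep : pvStep (mc, acc) c = (0, if mc ≠ 0 then acc ++ [mc] else acc) := by
        simp [pvStep, hdot]
      rw [hstep, ih 0 _ le_rfl, pvF_zero]
      rw [show (List.splitOn '.' (c :: t)) = [] :: List.splitOn '.' t by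
        simp [List.splitOn, List.splitOnP_cons, hdot]]
      cases hs : List.splitOn '.' t with
      | nil => exact absurd (by simpa [List.splitOn] using hs) (List.splitOnP_ne_nil _ t)
      | cons h0 t0 =>
        simp only [pvF, List.filter_cons]
        by_cases hmc0 : mc = 0
        · by_cases hc : 0 < h0.count '#' <;> simp [hmc0, hc]
        · have hpos : 0 < mc := lt_of_le_of_ne hmc (Ne.symm hmc0)
          by_cases hc : 0 < h0.count '#' <;>
            simp [hmc0, hpos, hc, List.append_assoc]
    · have hsplit : List.splitOn '.' (c :: t) =
          (List.splitOn '.' t).modifyHead (List.cons c) := by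
        simp [List.splitOn, List.splitOnP_cons, hdot]
      cases hs : List.splitOn '.' t with
      | nil => exact absurd (by simpa [List.splitOn] using hs) (List.splitOnP_ne_nil _ t)
      | cons h0 t0 =>
        rw [hsplit, hs]
        by_cases hhash : c = '#'
        · have hstep : pvStep (mc, acc) c = (mc + 1, acc) := by
            simp [pvStep, hhash]
          rw [hstep, ih (mc + 1) acc (by omega), hs]
          simp only [pvF, List.modifyHead, List.count_cons, hhash]
          norm_num [add_comm, add_assoc, add_left_comm]
        · have hstep : pvStep (mc, acc) c = (mc, acc) := by
            simp [pvStep, hdot, hhash]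
          rw [hstep, ih mc acc hmc, hs]
          simp [pvF, hhash]

-- ===== VERDICT (by name: the statement is the Claim_ definition above) =====
theorem check_bitstring_spec : Claim_equal_check_bitstring := by
  intro s vs _
  unfold Spec_check_bitstring check_bitstring check_bitstring_alt
  rw [pvLoop s.toList 0 [] le_rfl, pvF_zero]
  simp
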